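-- pv_equiv track=rewrite | github.com/JYChen18/Dexonomy | dexonomy/util/file_util.py | _get_template_from_prefix
-- ===== SOURCE A (Python) =====
-- def _get_template_from_prefix(prefix: str, all_tmpl_names: list[str]) -> str:
--     ret_name = None
--     for tc in all_tmpl_names:
--         if tc.startswith(prefix):
--             if ret_name is not None:
--                 raise ValueError(
--                     f"Template name starting with {prefix} is not unique: {ret_name} {tc}"
--                 )
--             ret_name = tc
--     assert ret_name is not None, f"Template name starting with {prefix} not found"
--     return ret_name
-- ===== SOURCE B (Python) =====
-- def _get_template_from_prefix(prefix: str, all_tmpl_names: list[str]) -> str: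
--     # Sort, then binary-search the first name >= prefix: names starting with
--     # prefix form a contiguous block there, so one adjacency check decides uniqueness.
--     s = sorted(all_tmpl_names)
--     lo, hi = 0, len(s)
--     while lo < hi:
--         mid = (lo + hi) // 2
--         if s[mid] < prefix:
--             lo = mid + 1
--         else:
--             hi = mid
--     assert lo < len(s) and s[lo].startswith(prefix), (
--         f"Template name starting with {prefix} not found"
--     )
--     if lo + 1 < len(s) and s[lo + 1].startswith(prefix):
--         raise ValueError(
--             f"Template name starting with {prefix} is not unique: {s[lo]} {s[lo + 1]}"
--         )
--     return s[lo]
-- ===== Notes on version B (the rewrite author's own statement) =====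
-- stated objective: alternative
-- what changed: B sorts the names and binary-searches the first name >= prefix (matches form a contiguous block in sorted order), deciding uniqueness by one adjacency check, instead of A's single accumulator-threading scan.
import Mathlib
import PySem

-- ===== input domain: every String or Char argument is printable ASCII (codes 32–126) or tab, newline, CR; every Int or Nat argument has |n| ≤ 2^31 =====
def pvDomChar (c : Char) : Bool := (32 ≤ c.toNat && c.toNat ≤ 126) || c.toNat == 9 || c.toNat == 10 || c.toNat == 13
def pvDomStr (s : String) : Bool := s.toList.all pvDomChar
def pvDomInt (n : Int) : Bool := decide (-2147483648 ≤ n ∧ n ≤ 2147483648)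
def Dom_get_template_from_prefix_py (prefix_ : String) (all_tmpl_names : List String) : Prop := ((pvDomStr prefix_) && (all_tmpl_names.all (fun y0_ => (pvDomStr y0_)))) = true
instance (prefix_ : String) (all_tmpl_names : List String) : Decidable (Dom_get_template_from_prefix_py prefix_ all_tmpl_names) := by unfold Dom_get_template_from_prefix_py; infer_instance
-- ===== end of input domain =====

-- B sorts the names and binary-searches the first name >= prefix (matches are contiguous in sorted order), deciding uniqueness by one adjacency check, instead of A's accumulator-threading scan; equivalence is proved on inputs with exactly one match (elsewhere both Pythons raise).


-- ===== PORT A =====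
-- A's loop: thread ret_name : Option String; "" stands for the paths where Python raises
-- (second match → ValueError, no match → AssertionError); Pre_ excludes those inputs.
def pvALoop (prefix_ : String) : List String → Option String → String
  | [], acc => match acc with | some r => r | none => ""
  | tc :: rest, acc =>
    if PySem.Str.startswith tc prefix_ then
      match acc with
      | some _ => ""
      | none => pvALoop prefix_ rest (some tc)
    else pvALoop prefix_ rest acc

def get_template_from_prefix_py (prefix_ : String) (all_tmpl_names : List String) : String :=
  pvALoop prefix_ all_tmpl_names none

-- ===== PORT B =====
-- B's while-loop: binary search for the first index whose entry is >= prefix_.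
-- s[mid] is ported as getD: mid < hi ≤ s.length throughout (calls start with hi = s.length
-- and hi never grows), so the index is always in range and getD is exact there.
def pvBSearch (s : List String) (p : String) (lo hi : Nat) : Nat :=
  if h : lo < hi then
    let mid := (lo + hi) / 2
    if s.getD mid "" < p then pvBSearch s p (mid + 1) hi else pvBSearch s p lo mid
  else lo
termination_by hi - lo
decreasing_by all_goals omega

-- B after the sort: binary search, then one adjacency check; "" stands for the raising paths
-- (assert failure → AssertionError, second adjacent match → ValueError), which Pre_ excludes.
def pvBAfter (prefix_ : String) (s : List String) : String :=
  let lo := pvBSearch s prefix_ 0 s.length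
  if lo < s.length ∧ PySem.Str.startswith (s.getD lo "") prefix_ = true then
    if lo + 1 < s.length ∧ PySem.Str.startswith (s.getD (lo + 1) "") prefix_ = true then
      ""  -- raise ValueError (outside Pre_)
    else s.getD lo ""
  else ""  -- assert fails: AssertionError (outside Pre_)

def get_template_from_prefix_py_alt (prefix_ : String) (all_tmpl_names : List String) : String :=
  pvBAfter prefix_ (PySem.List.sorted all_tmpl_names (fun x => x) false)

-- ===== PRECONDITION & SPEC =====
-- Pre_: exactly one name starts with the prefix; on every other input the Python A raises
-- (ValueError if several matches, AssertionError if none), so nothing is claimed there.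
def Pre_get_template_from_prefix_py (prefix_ : String) (all_tmpl_names : List String) : Prop :=
  (all_tmpl_names.filter (fun t => PySem.Str.startswith t prefix_)).length = 1
instance (prefix_ : String) (all_tmpl_names : List String) : Decidable (Pre_get_template_from_prefix_py prefix_ all_tmpl_names) := by unfold Pre_get_template_from_prefix_py; infer_instance

def pvWitness_get_template_from_prefix_py : String × List String := ("ab", ["abc", "xy"])

def Spec_get_template_from_prefix_py (prefix_ : String) (all_tmpl_names : List String) (out : String) : Prop := out = get_template_from_prefix_py_alt prefix_ all_tmpl_names
instance (prefix_ : String) (all_tmpl_names : List String) (out : String) : Decidable (Spec_get_template_from_prefix_py prefix_ all_tmpl_names out) := by unfold Spec_get_template_from_prefix_py; infer_instance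

-- ===== CLAIM (what is proved, stated in full; the proofs are below) =====
def Claim_equal_get_template_from_prefix_py : Prop := ∀ (prefix_ : String) (all_tmpl_names : List String), Dom_get_template_from_prefix_py prefix_ all_tmpl_names → Pre_get_template_from_prefix_py prefix_ all_tmpl_names → Spec_get_template_from_prefix_py prefix_ all_tmpl_names (get_template_from_prefix_py prefix_ all_tmpl_names)

-- ===== LEMMAS AND PROOFS =====

-- a one-element filter splits the list around its unique match.
lemma filter_eq_singleton_decomp {α : Type} (q : α → Bool) (l : List α) (m : α)
    (h : l.filter q = [m]) :
    ∃ u v, l = u ++ m :: v ∧ (∀ x ∈ u, q x = false) ∧ q m = true ∧ (∀ x ∈ v, q x = false) := by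
  induction l with
  | nil => simp at h
  | cons a t ih =>
    rw [List.filter_cons] at h
    cases ha : q a with
    | true =>
      rw [ha] at h
      simp only [if_true] at h
      obtain ⟨rfl, hrest⟩ := List.cons_eq_cons.mp h
      exact ⟨[], t, rfl, by simp, ha, fun x hx => by simpa using List.filter_eq_nil_iff.mp hrest x hx⟩
    | false =>
      rw [ha] at h
      simp only [Bool.false_eq_true, if_false] at h
      obtain ⟨u, v, rfl, hu, hm, hv⟩ := ih h
      refine ⟨a :: u, v, rfl, ?_, hm, hv⟩
      intro x hx
      rcases List.mem_cons.mp hx with rfl | hx'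
      · exact ha
      · exact hu x hx'

-- A-side: the loop returns the single match.
lemma pvALoop_some (prefix_ : String) (l : List String) (r : String)
    (h : ∀ x ∈ l, PySem.Str.startswith x prefix_ = false) :
    pvALoop prefix_ l (some r) = r := by
  induction l with
  | nil => rfl
  | cons tc rest ih =>
    simp only [pvALoop, h tc (by simp), Bool.false_eq_true, if_false]
    exact ih fun x hx => h x (List.mem_cons_of_mem tc hx)

lemma pvALoop_none_decomp (prefix_ : String) (u v : List String) (m : String)
    (hu : ∀ x ∈ u, PySem.Str.startswith x prefix_ = false)
    (hm : PySem.Str.startswith m prefix_ = true)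
    (hv : ∀ x ∈ v, PySem.Str.startswith x prefix_ = false) :
    pvALoop prefix_ (u ++ m :: v) none = m := by
  induction u with
  | nil =>
    simp only [List.nil_append, pvALoop, hm, if_true]
    exact pvALoop_some prefix_ v m hv
  | cons a u' ih =>
    simp only [List.cons_append, pvALoop, hu a (by simp), Bool.false_eq_true,
      if_false]
    exact ih fun x hx => hu x (List.mem_cons_of_mem a hx)

-- lex order facts: a string never lex-precedes its own prefix …
lemma not_lex_append_self (l r : List Char) : ¬ List.Lex (· < ·) (l ++ r) l := by
  induction l with
  | nil => intro h; cases h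
  | cons a t ih =>
    intro h
    cases h with
    | rel hr => exact lt_irrefl a hr
    | cons h' => exact ih h'

lemma not_lt_of_prefix (p m : String) (h : p.toList <+: m.toList) : ¬ m < p := by
  obtain ⟨r, hr⟩ := h
  rw [String.lt_iff_toList_lt]
  intro hlt
  exact not_lex_append_self p.toList r (by rw [hr]; exact hlt)

-- … and anything lex-between a prefix p and a string extending p also extends p.
lemma prefix_sandwich (p s m : List Char) (hps : ¬ List.Lex (· < ·) s p)
    (hms : ¬ List.Lex (· < ·) m s) (pm : p <+: m) : p <+: s := by
  induction p generalizing s m with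
  | nil => exact List.nil_prefix
  | cons c p' ih =>
    obtain ⟨r, hr⟩ := pm
    cases s with
    | nil => exact absurd List.Lex.nil hps
    | cons a s' =>
      have hac : ¬ a < c := fun h => hps (List.Lex.rel h)
      have hca : ¬ c < a := by
        intro h
        apply hms
        rw [← hr]
        exact List.Lex.rel h
      have : a = c := le_antisymm (not_lt.mp hca) (not_lt.mp hac)
      subst this
      have h1 : ¬ List.Lex (· < ·) s' p' := fun h => hps (List.Lex.cons h)
      have h2 : ¬ List.Lex (· < ·) (p' ++ r) s' := by
        intro h
        apply hms
        rw [← hr]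
        exact List.Lex.cons h
      exact List.cons_prefix_cons.mpr ⟨rfl, ih s' (p' ++ r) h1 h2 ⟨r, rfl⟩⟩

lemma startswith_of_between (p s m : String) (hsp : ¬ s < p) (hsm : s ≤ m)
    (hm : PySem.Str.startswith m p = true) : PySem.Str.startswith s p = true := by
  simp only [PySem.Str.startswith_eq, PySem.Chars.startswith_iff] at hm ⊢
  refine prefix_sandwich p.toList s.toList m.toList ?_ ?_ hm
  · intro h; exact hsp (String.lt_iff_toList_lt.mpr h)
  · intro h
    exact absurd (String.lt_iff_toList_lt.mpr h) (not_lt.mpr hsm)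

-- binary-search invariant: the result separates the entries < p from the rest.
lemma pvBSearch_spec (s : List String) (p : String)
    (hsort : ∀ i j : Nat, i ≤ j → j < s.length → s.getD i "" ≤ s.getD j "") :
    ∀ (n lo hi : Nat), hi - lo ≤ n → lo ≤ hi → hi ≤ s.length →
    (∀ i, i < lo → s.getD i "" < p) →
    (∀ i, hi ≤ i → i < s.length → ¬ s.getD i "" < p) →
    (∀ i, i < pvBSearch s p lo hi → s.getD i "" < p) ∧
    (∀ i, pvBSearch s p lo hi ≤ i → i < s.length → ¬ s.getD i "" < p) ∧
    pvBSearch s p lo hi ≤ s.length := by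
  intro n
  induction n with
  | zero =>
    intro lo hi hfuel hle hhi Hlo Hhi
    have : lo = hi := by omega
    subst this
    rw [pvBSearch]
    simp only [lt_irrefl, dite_false]
    exact ⟨Hlo, Hhi, hhi⟩
  | succ k ih =>
    intro lo hi hfuel hle hhi Hlo Hhi
    rw [pvBSearch]
    by_cases h : lo < hi
    · simp only [h, dite_true]
      have hmid2 : (lo + hi) / 2 < hi := by omega
      by_cases hc : s.getD ((lo + hi) / 2) "" < p
      · simp only [hc, if_true]
        refine ih ((lo + hi) / 2 + 1) hi (by omega) (by omega) hhi ?_ Hhi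
        intro i hi'
        rcases lt_or_ge i lo with h' | h'
        · exact Hlo i h'
        · exact lt_of_le_of_lt (hsort i ((lo + hi) / 2) (by omega) (by omega)) hc
      · simp only [hc, if_false]
        refine ih lo ((lo + hi) / 2) (by omega) (by omega) (by omega) Hlo ?_
        intro i hi' hilen hip
        exact hc (lt_of_le_of_lt (hsort ((lo + hi) / 2) i hi' hilen) hip)
    · simp only [h, dite_false]
      have : lo = hi := by omega
      subst this
      exact ⟨Hlo, Hhi, hhi⟩

-- a one-element filter pins down a unique matching index (getD form).
lemma singleton_filter_index {α : Type} (q : α → Bool) (d : α) (s : List α) (m : α)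
    (h : s.filter q = [m]) :
    ∃ j : Nat, j < s.length ∧ s.getD j d = m ∧ q m = true ∧
      ∀ i : Nat, i < s.length → i ≠ j → q (s.getD i d) = false := by
  obtain ⟨u, v, rfl, hu, hm, hv⟩ := filter_eq_singleton_decomp q _ m h
  refine ⟨u.length, by simp, ?_, hm, ?_⟩
  · rw [List.getD_append_right u (m :: v) d u.length (le_refl _)]
    simp
  · intro i hlen hne
    rcases lt_or_ge i u.length with hi | hi
    · rw [List.getD_append u (m :: v) d i hi]
      apply hu
      rw [List.getD_eq_getElem u d hi]
      exact List.getElem_mem hi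
    · have hgt : u.length < i := by omega
      rw [List.getD_append_right u (m :: v) d i (by omega)]
      have hik : i - u.length = (i - u.length - 1) + 1 := by omega
      rw [hik, List.getD_cons_succ]
      apply hv
      have hb : i - u.length - 1 < v.length := by
        simp only [List.length_append, List.length_cons] at hlen
        omega
      rw [List.getD_eq_getElem v d hb]
      exact List.getElem_mem hb

-- B after the sort returns the single match.
lemma pvBAfter_eq (prefix_ : String) (s : List String) (m : String)
    (hpw : s.Pairwise (· ≤ ·))
    (hfs : s.filter (fun t => PySem.Str.startswith t prefix_) = [m]) :
    pvBAfter prefix_ s = m := by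
  obtain ⟨j, hj, hjm, hqm, huniq⟩ :=
    singleton_filter_index (fun t => PySem.Str.startswith t prefix_) "" s m hfs
  have hsort : ∀ i j : Nat, i ≤ j → j < s.length → s.getD i "" ≤ s.getD j "" := by
    intro i j hij hjlen
    rcases eq_or_lt_of_le hij with rfl | hlt
    · exact le_refl _
    · rw [List.getD_eq_getElem s "" (by omega), List.getD_eq_getElem s "" hjlen]
      exact List.pairwise_iff_getElem.mp hpw i j (by omega) hjlen hlt
  obtain ⟨H1, H2, H3⟩ := pvBSearch_spec s prefix_ hsort s.length 0 s.length (by omega)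
    (by omega) (le_refl _) (by omega) (by omega)
  unfold pvBAfter
  set r := pvBSearch s prefix_ 0 s.length with hr
  have hjr : ¬ j < r := by
    intro h
    have := H1 j h
    rw [hjm] at this
    exact not_lt_of_prefix prefix_ m
      ((PySem.Chars.startswith_iff m.toList prefix_.toList).mp (by simpa using hqm)) this
  have hrj : r = j := by
    by_contra hne
    have hrlt : r < j := by omega
    have hx : ¬ s.getD r "" < prefix_ := H2 r (le_refl _) (by omega)
    have hxm : s.getD r "" ≤ s.getD j "" := hsort r j (by omega) hj
    rw [hjm] at hxm
    have hsw : PySem.Str.startswith (s.getD r "") prefix_ = true :=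
      startswith_of_between prefix_ (s.getD r "") m hx hxm hqm
    have := huniq r (by omega) hne
    simp only [this] at hsw
    exact Bool.false_ne_true hsw
  have hget : s.getD r "" = m := by rw [hrj, hjm]
  have hcond1 : r < s.length ∧ PySem.Str.startswith (s.getD r "") prefix_ = true := by
    refine ⟨by omega, ?_⟩
    rw [hget]
    exact hqm
  rw [if_pos hcond1]
  have hcond2 : ¬ (r + 1 < s.length ∧ PySem.Str.startswith (s.getD (r + 1) "") prefix_ = true) := by
    rintro ⟨hlen, hsw⟩
    have := huniq (r + 1) hlen (by omega)
    simp only [this] at hsw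
    exact Bool.false_ne_true hsw
  rw [if_neg hcond2]
  exact hget

-- ===== VERDICT (by name: the statement is the Claim_ definition above) =====
theorem get_template_from_prefix_py_spec : Claim_equal_get_template_from_prefix_py := by
  intro prefix_ names _ hpre
  unfold Pre_get_template_from_prefix_py at hpre
  obtain ⟨m, hm⟩ := List.length_eq_one_iff.mp hpre
  unfold Spec_get_template_from_prefix_py get_template_from_prefix_py
    get_template_from_prefix_py_alt
  obtain ⟨u, v, hnames, hu, hqm, hv⟩ :=
    filter_eq_singleton_decomp (fun t => PySem.Str.startswith t prefix_) names m hm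
  have hA : pvALoop prefix_ names none = m := by
    rw [hnames]
    exact pvALoop_none_decomp prefix_ u v m hu hqm hv
  rw [hA]
  have hperm : (PySem.List.sorted names (fun x => x) false).Perm names :=
    PySem.List.sorted_perm names (fun x => x) false
  have hfs : (PySem.List.sorted names (fun x => x) false).filter
      (fun t => PySem.Str.startswith t prefix_) = [m] := by
    rw [← List.perm_singleton]
    rw [← hm]
    exact hperm.filter _
  exact (pvBAfter_eq prefix_ _ m (PySem.List.sorted_pairwise names (fun x => x)) hfs).symm
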